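-- pv_equiv track=rewrite | github.com/icpac/python | Graficas/MatrizAdy.py | make_label_dict
-- ===== SOURCE A (Python) =====
-- def make_label_dict(labels):
--     l = {}
--     j = 0
--     for i, label in enumerate(labels):
--         if label:
--             l[i-j] = label
--         else:
--             j+=1
--     return l
-- ===== SOURCE B (Python) =====
-- def make_label_dict(labels):
--     # two-pass, reverse traversal: count truthy labels, then walk backwards
--     # assigning decreasing keys; reverse the collected pairs and build the dict
--     k = sum(map(bool, labels))
--     pairs = []
--     for label in reversed(labels):
--         if label:
--             k -= 1
--             pairs.append((k, label))
--     pairs.reverse()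
--     return dict(pairs)
-- ===== Notes on version B (the rewrite author's own statement) =====
-- stated objective: alternative
-- what changed: Replaces A's single forward pass with a skip counter and arithmetic keys i-j by a two-pass scheme: count the truthy labels, traverse the list in reverse assigning decreasing keys, then reverse the pair list and build the dict at the end.
import Mathlib
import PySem

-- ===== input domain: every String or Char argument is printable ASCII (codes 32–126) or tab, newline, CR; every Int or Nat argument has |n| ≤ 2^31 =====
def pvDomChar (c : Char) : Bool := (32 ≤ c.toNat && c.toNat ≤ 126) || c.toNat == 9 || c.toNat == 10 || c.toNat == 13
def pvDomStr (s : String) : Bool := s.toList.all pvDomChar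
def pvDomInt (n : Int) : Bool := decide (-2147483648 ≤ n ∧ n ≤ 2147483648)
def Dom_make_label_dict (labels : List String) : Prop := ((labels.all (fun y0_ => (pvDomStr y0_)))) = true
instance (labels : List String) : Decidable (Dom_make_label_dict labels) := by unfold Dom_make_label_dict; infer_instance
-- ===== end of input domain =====

-- B replaces A's forward pass with a skip counter by: count truthy labels, reverse
-- traversal assigning decreasing keys, reverse the pair list, build the dict at the end
-- (objective: alternative, same cost).

-- ===== PORT A =====
-- loop body: if label: l[i-j] = label else: j += 1   (state = (l, j))
def mldStep (s : PySem.Dict Int String × Int) (p : Int × String) : PySem.Dict Int String × Int :=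
  if p.2 ≠ "" then (s.1.insert (p.1 - s.2) p.2, s.2) else (s.1, s.2 + 1)

-- l = {}; j = 0; for i, label in enumerate(labels): <loop body>; return l
def make_label_dict (labels : List String) : List (Int × String) :=
  ((PySem.List.enumerate labels 0).foldl mldStep (PySem.Dict.empty, 0)).1.items

-- ===== PORT B =====
-- loop body: if label: k -= 1; pairs.append((k, label))   (state = (k, pairs))
def mldAltStep (s : Int × List (Int × String)) (label : String) : Int × List (Int × String) :=
  if label ≠ "" then (s.1 - 1, s.2 ++ [(s.1 - 1, label)]) else s

-- k = sum(map(bool, labels)); for label in reversed(labels): <loop body>;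
-- pairs.reverse(); return dict(pairs)
def make_label_dict_alt (labels : List String) : List (Int × String) :=
  let k : Int := (labels.map (fun x => if x = "" then (0 : Int) else 1)).sum
  let pairs := (labels.reverse.foldl mldAltStep (k, [])).2
  (PySem.Dict.ofList pairs.reverse).items

-- ===== PRECONDITION & SPEC =====
def Spec_make_label_dict (labels : List String) (out : List (Int × String)) : Prop := out = make_label_dict_alt labels
instance (labels : List String) (out : List (Int × String)) : Decidable (Spec_make_label_dict labels out) := by unfold Spec_make_label_dict; infer_instance

-- ===== CLAIM (what is proved, stated in full; the proofs are below) =====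
def Claim_equal_make_label_dict : Prop := ∀ (labels : List String), Dom_make_label_dict labels → Spec_make_label_dict labels (make_label_dict labels)

-- ===== LEMMAS AND PROOFS =====

-- A's loop invariant: with all existing keys below i - j, the fold appends the
-- enumeration of the remaining truthy labels starting at key i - j.
lemma mld_loop_items (ys : List String) : ∀ (i j : Int) (d : PySem.Dict Int String),
    (∀ k ∈ d.keys, k < i - j) →
    ((PySem.List.enumerate ys i).foldl mldStep (d, j)).1.items
    = d.items ++ PySem.List.enumerate (ys.filter (fun x => x ≠ "")) (i - j) := by
  induction ys with
  | nil => intro i j d _; simp [PySem.List.enumerate_nil]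
  | cons x ys ih =>
    intro i j d hk
    rw [PySem.List.enumerate_cons, List.foldl_cons]
    by_cases hx : x = ""
    · rw [show mldStep (d, j) (i, x) = (d, j + 1) from by simp [mldStep, hx]]
      rw [ih (i + 1) (j + 1) d (by intro k hk'; have := hk k hk'; omega)]
      rw [List.filter_cons_of_neg (by simp [hx])]
      simp [show i + 1 - (j + 1) = i - j from by ring]
    · rw [show mldStep (d, j) (i, x) = (d.insert (i - j) x, j) from by simp [mldStep, hx]]
      have hnc : d.contains (i - j) = false := by
        cases hcc : d.contains (i - j) with
        | false => rfl
        | true =>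
          have hm : (i - j) ∈ d.keys := (PySem.Dict.contains_iff_mem_keys d _).mp hcc
          have := hk _ hm; omega
      have hk' : ∀ k ∈ (d.insert (i - j) x).keys, k < i + 1 - j := by
        intro k hkm
        rcases (PySem.Dict.mem_keys_insert d _ _ _).mp hkm with h | h
        · omega
        · have := hk k h; omega
      rw [ih (i + 1) j _ hk']
      rw [PySem.Dict.items_insert_of_not_contains d x hnc]
      rw [List.filter_cons_of_pos (by simpa using hx)]
      rw [PySem.List.enumerate_cons]
      simp [show i + 1 - j = i - j + 1 from by ring]

-- the truthy-count sum equals the length of the truthy filter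
lemma mld_sum_eq_filter_length (ys : List String) :
    (ys.map (fun x => if x = "" then (0 : Int) else 1)).sum
    = ((ys.filter (fun x => x ≠ "")).length : Int) := by
  induction ys with
  | nil => simp
  | cons x ys ih =>
    by_cases hx : x = "" <;> simp [hx, ih]; omega

-- B's loop invariant (processing the reversed list): starting from key c, the fold
-- over zs ends at c minus the truthy count of zs, having appended to the accumulator
-- the reversed enumeration of the truthy labels of zs.reverse keyed from there.
lemma mldAlt_loop (zs : List String) : ∀ (c : Int) (acc : List (Int × String)),
    zs.foldl mldAltStep (c, acc)
    = (c - ((zs.filter (fun x => x ≠ "")).length : Int),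
       acc ++ (PySem.List.enumerate (zs.reverse.filter (fun x => x ≠ ""))
                 (c - ((zs.filter (fun x => x ≠ "")).length : Int))).reverse) := by
  induction zs with
  | nil => intro c acc; simp [PySem.List.enumerate_nil]
  | cons z zs ih =>
    intro c acc
    rw [List.foldl_cons]
    by_cases hz : z = ""
    · rw [show mldAltStep (c, acc) z = (c, acc) from by simp [mldAltStep, hz]]
      rw [ih c acc]
      simp [hz]
    · rw [show mldAltStep (c, acc) z = (c - 1, acc ++ [(c - 1, z)]) from by
        simp [mldAltStep, hz]]
      rw [ih (c - 1) (acc ++ [(c - 1, z)])]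
      have hfl : (z :: zs).filter (fun x => x ≠ "") = z :: zs.filter (fun x => x ≠ "") := by
        simp [hz]
      have hfr : (z :: zs).reverse.filter (fun x => x ≠ "")
          = zs.reverse.filter (fun x => x ≠ "") ++ [z] := by
        simp [List.filter_append, hz]
      rw [hfl, hfr, PySem.List.enumerate_append]
      have hlenN : (zs.reverse.filter (fun x => x ≠ "")).length
          = (zs.filter (fun x => x ≠ "")).length := by
        rw [List.filter_reverse, List.length_reverse]
      rw [List.reverse_append, Prod.mk.injEq]
      refine ⟨by simp only [List.length_cons]; push_cast; omega, ?_⟩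
      have e1 : PySem.List.enumerate [z]
            (c - (((z :: zs.filter (fun x => x ≠ "")).length : Nat) : Int)
              + ((zs.reverse.filter (fun x => x ≠ "")).length : Int)) = [(c - 1, z)] := by
        rw [PySem.List.enumerate_cons, PySem.List.enumerate_nil]
        congr 2
        simp only [List.length_cons, hlenN]
        push_cast
        omega
      have e2 : c - (((z :: zs.filter (fun x => x ≠ "")).length : Nat) : Int)
          = c - 1 - ((zs.filter (fun x => x ≠ "")).length : Int) := by
        simp only [List.length_cons]; push_cast; omega
      rw [e1, e2]
      simp [List.append_assoc]

-- keys produced by enumerate from 0 are fresh and distinct, so ofList's items are the list itself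
lemma mld_ofList_items (xs : List String) :
    (PySem.Dict.ofList (PySem.List.enumerate xs 0)).items = PySem.List.enumerate xs 0 := by
  have h := PySem.Dict.items_foldl_insert_fresh (l := PySem.List.enumerate xs 0)
      (d := (PySem.Dict.empty : PySem.Dict Int String)) (k := fun p => p.1) (v := fun p => p.2)
      (by intro a _; simp [PySem.Dict.contains_empty])
      (by
        have he : (PySem.List.enumerate xs 0).map (·.1) = PySem.List.pyRange 0 (0 + xs.length) 1 :=
          PySem.List.map_fst_enumerate xs 0
        rw [he]
        exact PySem.List.nodup_pyRange_one 0 (0 + xs.length))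
  simpa [PySem.Dict.ofList, PySem.Dict.empty] using h

-- ===== VERDICT (by name: the statement is the Claim_ definition above) =====
theorem make_label_dict_spec : Claim_equal_make_label_dict := by
  intro labels _
  show make_label_dict labels = make_label_dict_alt labels
  unfold make_label_dict make_label_dict_alt
  dsimp only
  rw [mld_loop_items labels 0 0 PySem.Dict.empty (by simp [PySem.Dict.empty, PySem.Dict.keys]),
      mld_sum_eq_filter_length, mldAlt_loop]
  simp [List.filter_reverse, mld_ofList_items, PySem.Dict.empty]
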